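-- pv_equiv track=rewrite | github.com/Angeliteh/ia-proyect | agents/orchestrator_agent.py | _determine_agent_type_from_capabilities
-- ===== SOURCE A (Python) =====
-- from typing import Dict, List, Optional, Any, Tuple
--
-- def _determine_agent_type_from_capabilities(capabilities: List[str]) -> str:
--     """
--     Determina el tipo de agente más apropiado basado en las capacidades requeridas.
--
--     Args:
--         capabilities: Lista de capacidades requeridas
--
--     Returns:
--         Tipo de agente (code, system, echo)
--     """
--     # Crear un mapa de capacidades a tipos de agentes
--     capability_map = {
--         # Capacidades del CodeAgent
--         "code_generation": "code",
--         "analysis": "code",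
--         "problem_solving": "code",
--         "testing": "code",
--         "verification": "code",
--
--         # Capacidades del SystemAgent
--         "system_operations": "system",
--         "file_management": "system",
--         "execute_command": "system",
--         "process_management": "system",
--
--         # Capacidades del EchoAgent y generales
--         "echo": "echo",
--         "test": "echo",
--         "general_processing": "echo",
--         "information_retrieval": "echo",
--         "search": "echo",
--         "summarization": "echo"
--     }
--
--     # Contar los tipos de agentes que coinciden con cada capacidad
--     type_counts = {"code": 0, "system": 0, "echo": 0}
--
--     for capability in capabilities:
--         agent_type = capability_map.get(capability, "echo")  # Por defecto, usar echo
--         type_counts[agent_type] += 1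
--
--     # Seleccionar el tipo con más coincidencias
--     if type_counts["code"] > 0:
--         return "code"
--     elif type_counts["system"] > 0:
--         return "system"
--     else:
--         return "echo"
-- ===== SOURCE B (Python) =====
-- # B: two short-circuiting membership scans over grouped capability sets
-- # instead of building and inspecting a per-type counts dict.
-- CODE_CAPS = {"code_generation", "analysis", "problem_solving", "testing", "verification"}
-- SYSTEM_CAPS = {"system_operations", "file_management", "execute_command", "process_management"}
--
-- def _determine_agent_type_from_capabilities(capabilities):
--     if any(c in CODE_CAPS for c in capabilities):
--         return "code"
--     if any(c in SYSTEM_CAPS for c in capabilities):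
--         return "system"
--     return "echo"
-- ===== Notes on version B (the rewrite author's own statement) =====
-- stated objective: simpler
-- what changed: Replaces the capability->type dict plus the counting loop and counts inspection by two short-circuiting any() membership scans over the grouped code/system capability sets, with unknown capabilities falling through to 'echo'.
import Mathlib
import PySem

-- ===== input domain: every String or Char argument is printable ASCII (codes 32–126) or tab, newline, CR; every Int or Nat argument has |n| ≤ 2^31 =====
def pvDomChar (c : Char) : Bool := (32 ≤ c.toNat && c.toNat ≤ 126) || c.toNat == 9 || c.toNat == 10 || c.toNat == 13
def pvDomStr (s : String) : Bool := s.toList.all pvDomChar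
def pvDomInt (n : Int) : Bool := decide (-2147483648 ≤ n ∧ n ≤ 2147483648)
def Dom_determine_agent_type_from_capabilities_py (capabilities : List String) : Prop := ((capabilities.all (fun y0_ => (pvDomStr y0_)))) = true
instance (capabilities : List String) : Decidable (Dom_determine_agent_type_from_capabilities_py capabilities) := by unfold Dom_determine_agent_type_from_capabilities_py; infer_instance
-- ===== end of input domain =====

-- B replaces A's capability→type dict and counting loop by two short-circuiting
-- membership scans over grouped capability sets (objective: simpler).

-- ===== PORT A =====
def pvCapabilityMap : PySem.Dict String String := PySem.Dict.ofList
  [("code_generation", "code"), ("analysis", "code"), ("problem_solving", "code"),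
   ("testing", "code"), ("verification", "code"),
   ("system_operations", "system"), ("file_management", "system"),
   ("execute_command", "system"), ("process_management", "system"),
   ("echo", "echo"), ("test", "echo"), ("general_processing", "echo"),
   ("information_retrieval", "echo"), ("search", "echo"), ("summarization", "echo")]

def determine_agent_type_from_capabilities_py (capabilities : List String) : String :=
  let typeCounts0 : PySem.Dict String Int :=
    PySem.Dict.ofList [("code", 0), ("system", 0), ("echo", 0)]
  let typeCounts := capabilities.foldl
    (fun d capability =>
      let agentType := pvCapabilityMap.getD capability "echo"
      d.insert agentType (d.getD agentType 0 + 1)) typeCounts0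
  if typeCounts.getD "code" 0 > 0 then "code"
  else if typeCounts.getD "system" 0 > 0 then "system"
  else "echo"

-- ===== PORT B =====
def pvCodeCaps : PySem.Set String := PySem.Set.ofList
  ["code_generation", "analysis", "problem_solving", "testing", "verification"]
def pvSystemCaps : PySem.Set String := PySem.Set.ofList
  ["system_operations", "file_management", "execute_command", "process_management"]

def determine_agent_type_from_capabilities_py_alt (capabilities : List String) : String :=
  if capabilities.any (fun c => pvCodeCaps.contains c) then "code"
  else if capabilities.any (fun c => pvSystemCaps.contains c) then "system"
  else "echo"

-- ===== PRECONDITION & SPEC =====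
def Spec_determine_agent_type_from_capabilities_py (capabilities : List String) (out : String) : Prop := out = determine_agent_type_from_capabilities_py_alt capabilities
instance (capabilities : List String) (out : String) : Decidable (Spec_determine_agent_type_from_capabilities_py capabilities out) := by unfold Spec_determine_agent_type_from_capabilities_py; infer_instance

-- ===== CLAIM (what is proved, stated in full; the proofs are below) =====
def Claim_equal_determine_agent_type_from_capabilities_py : Prop := ∀ (capabilities : List String), Dom_determine_agent_type_from_capabilities_py capabilities → Spec_determine_agent_type_from_capabilities_py capabilities (determine_agent_type_from_capabilities_py capabilities)

-- ===== LEMMAS AND PROOFS =====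

-- the key function A applies to each capability
def pvKey (c : String) : String := pvCapabilityMap.getD c "echo"

-- the count A's loop leaves in the counts dict for type t
lemma pv_counts (capabilities : List String) (t : String) :
    (capabilities.foldl
      (fun d capability =>
        let agentType := pvCapabilityMap.getD capability "echo"
        d.insert agentType (d.getD agentType 0 + 1))
      (PySem.Dict.ofList [("code", 0), ("system", 0), ("echo", 0)])).getD t 0
    = (PySem.Dict.ofList [("code", (0:Int)), ("system", 0), ("echo", 0)]).getD t 0
      + (capabilities.map pvKey).count t := by
  have h := PySem.Dict.getD_foldl_insert_add_one (capabilities.map pvKey)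
    (PySem.Dict.ofList [("code", (0:Int)), ("system", 0), ("echo", 0)]) t
  rw [List.foldl_map] at h
  simpa [pvKey] using h

-- pointwise: A's key sends c to "code" iff c is in B's code set
lemma pvCapMap_mk : pvCapabilityMap = PySem.Dict.mk
    [("code_generation", "code"), ("analysis", "code"), ("problem_solving", "code"),
     ("testing", "code"), ("verification", "code"),
     ("system_operations", "system"), ("file_management", "system"),
     ("execute_command", "system"), ("process_management", "system"),
     ("echo", "echo"), ("test", "echo"), ("general_processing", "echo"),
     ("information_retrieval", "echo"), ("search", "echo"), ("summarization", "echo")] := by decide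

lemma pv_code_iff (c : String) : (pvKey c = "code") ↔ pvCodeCaps.contains c = true := by
  rw [pvKey, pvCapMap_mk, PySem.Set.contains_iff,
    show pvCodeCaps = PySem.Set.ofList ["code_generation", "analysis", "problem_solving", "testing", "verification"] from rfl,
    PySem.Set.mem_ofList]
  simp only [List.mem_cons, List.not_mem_nil, or_false]
  by_cases hc : c ∈ (["code_generation", "analysis", "problem_solving", "testing", "verification", "system_operations", "file_management", "execute_command", "process_management", "echo", "test", "general_processing", "information_retrieval", "search", "summarization"] : List String)
  · simp only [List.mem_cons, List.not_mem_nil, or_false] at hc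
    rcases hc with rfl | rfl | rfl | rfl | rfl | rfl | rfl | rfl | rfl | rfl | rfl | rfl | rfl | rfl | rfl <;> decide
  · have hn : (PySem.Dict.mk
      [("code_generation", "code"), ("analysis", "code"), ("problem_solving", "code"),
       ("testing", "code"), ("verification", "code"),
       ("system_operations", "system"), ("file_management", "system"),
       ("execute_command", "system"), ("process_management", "system"),
       ("echo", "echo"), ("test", "echo"), ("general_processing", "echo"),
       ("information_retrieval", "echo"), ("search", "echo"), ("summarization", "echo")]).get? c = none := by
      rw [PySem.Dict.get?_eq_none_iff_not_mem_keys]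
      simpa using hc
    rw [PySem.Dict.getD_eq_get?_getD, hn]
    simp only [Option.getD_none]
    constructor
    · intro h; exact absurd h (by decide)
    · intro h; exfalso; apply hc
      rcases h with rfl | rfl | rfl | rfl | rfl <;> simp

lemma pv_system_iff (c : String) : (pvKey c = "system") ↔ pvSystemCaps.contains c = true := by
  rw [pvKey, pvCapMap_mk, PySem.Set.contains_iff,
    show pvSystemCaps = PySem.Set.ofList ["system_operations", "file_management", "execute_command", "process_management"] from rfl,
    PySem.Set.mem_ofList]
  simp only [List.mem_cons, List.not_mem_nil, or_false]
  by_cases hc : c ∈ (["code_generation", "analysis", "problem_solving", "testing", "verification", "system_operations", "file_management", "execute_command", "process_management", "echo", "test", "general_processing", "information_retrieval", "search", "summarization"] : List String)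
  · simp only [List.mem_cons, List.not_mem_nil, or_false] at hc
    rcases hc with rfl | rfl | rfl | rfl | rfl | rfl | rfl | rfl | rfl | rfl | rfl | rfl | rfl | rfl | rfl <;> decide
  · have hn : (PySem.Dict.mk
      [("code_generation", "code"), ("analysis", "code"), ("problem_solving", "code"),
       ("testing", "code"), ("verification", "code"),
       ("system_operations", "system"), ("file_management", "system"),
       ("execute_command", "system"), ("process_management", "system"),
       ("echo", "echo"), ("test", "echo"), ("general_processing", "echo"),
       ("information_retrieval", "echo"), ("search", "echo"), ("summarization", "echo")]).get? c = none := by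
      rw [PySem.Dict.get?_eq_none_iff_not_mem_keys]
      simpa using hc
    rw [PySem.Dict.getD_eq_get?_getD, hn]
    simp only [Option.getD_none]
    constructor
    · intro h; exact absurd h (by decide)
    · intro h; exfalso; apply hc
      rcases h with rfl | rfl | rfl | rfl <;> simp

lemma pv_count_pos (capabilities : List String) (t : String) :
    (0 < (capabilities.map pvKey).count t) ↔ ∃ c ∈ capabilities, pvKey c = t := by
  rw [List.count_pos_iff]
  simp [eq_comm]

-- ===== VERDICT (by name: the statement is the Claim_ definition above) =====
theorem determine_agent_type_from_capabilities_py_spec : Claim_equal_determine_agent_type_from_capabilities_py := by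
  intro capabilities _
  unfold Spec_determine_agent_type_from_capabilities_py
  unfold determine_agent_type_from_capabilities_py determine_agent_type_from_capabilities_py_alt
  simp only [pv_counts]
  have hcode : (0 : Int) < (PySem.Dict.ofList [("code", (0:Int)), ("system", 0), ("echo", 0)]).getD "code" 0 + (capabilities.map pvKey).count "code"
      ↔ capabilities.any (fun c => pvCodeCaps.contains c) = true := by
    have h0 : (PySem.Dict.ofList [("code", (0:Int)), ("system", 0), ("echo", 0)]).getD "code" 0 = 0 := by decide
    rw [h0, zero_add]
    have : (0 : Int) < ((capabilities.map pvKey).count "code" : Int) ↔ 0 < (capabilities.map pvKey).count "code" := by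
      exact_mod_cast Iff.rfl
    rw [this, pv_count_pos]
    simp only [List.any_eq_true]
    constructor
    · rintro ⟨c, hc, hk⟩; exact ⟨c, hc, (pv_code_iff c).mp hk⟩
    · rintro ⟨c, hc, hk⟩; exact ⟨c, hc, (pv_code_iff c).mpr hk⟩
  have hsys : (0 : Int) < (PySem.Dict.ofList [("code", (0:Int)), ("system", 0), ("echo", 0)]).getD "system" 0 + (capabilities.map pvKey).count "system"
      ↔ capabilities.any (fun c => pvSystemCaps.contains c) = true := by
    have h0 : (PySem.Dict.ofList [("code", (0:Int)), ("system", 0), ("echo", 0)]).getD "system" 0 = 0 := by decide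
    rw [h0, zero_add]
    have : (0 : Int) < ((capabilities.map pvKey).count "system" : Int) ↔ 0 < (capabilities.map pvKey).count "system" := by
      exact_mod_cast Iff.rfl
    rw [this, pv_count_pos]
    simp only [List.any_eq_true]
    constructor
    · rintro ⟨c, hc, hk⟩; exact ⟨c, hc, (pv_system_iff c).mp hk⟩
    · rintro ⟨c, hc, hk⟩; exact ⟨c, hc, (pv_system_iff c).mpr hk⟩
  simp only [hcode, hsys]
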